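-- pv_equiv track=rewrite | github.com/VadimBir/LLM_SelfAttention_Simulation_SparQ | 000-custom_scripts/pseudo_prefetcher_simulation.py | find_periodic_accesses
-- ===== SOURCE A (Python) =====
-- def find_periodic_accesses(data, max_period=100):
--     periodic_patterns = {}
--     for period in range(1, max_period):
--         seen = {}
--         for i in range(len(data)):
--             if i % period in seen and seen[i % period] != data[i]:
--                 break
--             seen[i % period] = data[i]
--         else:
--             periodic_patterns[period] = seen
--     return periodic_patterns
-- ===== SOURCE B (Python) =====
-- def find_periodic_accesses(data, max_period=100):
--     # A period p holds iff shifting the sequence by p changes nothing: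
--     # data[p:] == data[:-p].  The residue table for a valid p is just the
--     # first min(p, len(data)) elements keyed by their index.
--     return {p: dict(enumerate(data[:p]))
--             for p in range(1, max_period)
--             if data[p:] == data[:-p]}
-- ===== Notes on version B (the rewrite author's own statement) =====
-- stated objective: simpler
-- what changed: B replaces A's per-period residue dictionary with break/else by a single shifted-slice comparison data[p:] == data[:-p] per period, rebuilding the residue table as dict(enumerate(data[:p])) only for accepted periods.
import Mathlib
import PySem

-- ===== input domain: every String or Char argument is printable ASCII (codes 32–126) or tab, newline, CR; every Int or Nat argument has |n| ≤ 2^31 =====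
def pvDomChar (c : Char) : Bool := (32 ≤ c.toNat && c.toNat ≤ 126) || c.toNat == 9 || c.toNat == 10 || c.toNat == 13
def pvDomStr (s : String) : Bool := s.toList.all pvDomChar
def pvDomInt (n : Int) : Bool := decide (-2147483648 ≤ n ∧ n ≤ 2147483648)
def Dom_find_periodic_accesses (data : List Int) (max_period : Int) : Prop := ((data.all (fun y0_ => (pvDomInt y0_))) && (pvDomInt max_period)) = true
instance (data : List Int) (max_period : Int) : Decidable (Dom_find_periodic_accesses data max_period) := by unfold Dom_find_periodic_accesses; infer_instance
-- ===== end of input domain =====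

-- B replaces A's per-period residue-dictionary scan by one shifted-slice
-- comparison data[p:] == data[:-p] per period (objective: simpler/idiomatic).

-- ===== PORT A =====
-- A's inner 'for i in range(len(data))' loop with its break/else, walking the
-- remaining elements while carrying the running index i and the dict 'seen';
-- 'none' = the loop hit 'break', 'some seen' = the loop finished normally.
def pvSeenLoopA (period : Int) : List Int → Int → PySem.Dict Int Int → Option (PySem.Dict Int Int)
  | [], _, seen => some seen
  | x :: rest, i, seen =>
    let k := PySem.Int.mod i period
    if (seen.contains k) = true ∧ seen.get? k ≠ some x then none
    else pvSeenLoopA period rest (i + 1) (seen.insert k x)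

def find_periodic_accesses (data : List Int) (max_period : Int) : List (Int × List (Int × Int)) :=
  ((PySem.List.pyRange 1 max_period 1).foldl
    (fun pp period =>
      match pvSeenLoopA period data 0 PySem.Dict.empty with
      | some seen => pp.insert period seen.items
      | none => pp)
    (PySem.Dict.empty : PySem.Dict Int (List (Int × Int)))).items

-- ===== PORT B =====
def find_periodic_accesses_alt (data : List Int) (max_period : Int) : List (Int × List (Int × Int)) :=
  ((PySem.List.pyRange 1 max_period 1).filter
      (fun p => PySem.List.slice data (some p) none == PySem.List.slice data none (some (-p)))).map
    (fun p => (p, PySem.List.enumerate (PySem.List.slice data none (some p)) 0))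

-- ===== PRECONDITION & SPEC =====
def Spec_find_periodic_accesses (data : List Int) (max_period : Int) (out : List (Int × List (Int × Int))) : Prop := out = find_periodic_accesses_alt data max_period
instance (data : List Int) (max_period : Int) (out : List (Int × List (Int × Int))) : Decidable (Spec_find_periodic_accesses data max_period out) := by unfold Spec_find_periodic_accesses; infer_instance

-- ===== CLAIM (what is proved, stated in full; the proofs are below) =====
def Claim_equal_find_periodic_accesses : Prop := ∀ (data : List Int) (max_period : Int), Dom_find_periodic_accesses data max_period → Spec_find_periodic_accesses data max_period (find_periodic_accesses data max_period)

-- ===== LEMMAS AND PROOFS =====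

-- "l is p-periodic" in the form B tests it (drop/take level)
def pvPer (l : List Int) (p : Nat) : Prop := l.drop p = l.take (l.length - p)

theorem pvPer_get (l : List Int) (p : Nat) (h : pvPer l p) (j : Nat) (hj : j + p < l.length) :
    l[j + p]'hj = l[j]'(by omega) := by
  have h1 : (l.drop p)[j]'(by simp; omega) = (l.take (l.length - p))[j]'(by simp; omega) := by
    simp only [pvPer] at h; exact List.getElem_of_eq h _
  simpa [List.getElem_drop, List.getElem_take, Nat.add_comm] using h1

theorem pvPer_mod (l : List Int) (p : Nat) (hp : 0 < p) (h : pvPer l p) (i : Nat) (hi : i < l.length) :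
    l[i]'hi = l[i % p]'(by have := Nat.mod_le i p; omega) := by
  induction i using Nat.strong_induction_on with
  | _ i ih =>
    by_cases hip : i < p
    · have : i % p = i := Nat.mod_eq_of_lt hip
      exact (getElem_congr_idx this).symm
    · push_neg at hip
      have h1 : (i - p) + p = i := by omega
      have h2 : l[i]'hi = l[i - p]'(by omega) := by
        have := pvPer_get l p h (i - p) (by omega)
        simpa [h1] using this
      have h3 := ih (i - p) (by omega) (by omega)
      have h4 : (i - p) % p = i % p := (Nat.mod_eq_sub_mod hip).symm
      rw [h2, h3]
      exact getElem_congr_idx h4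

theorem pvPer_nil (p : Nat) : pvPer [] p := by simp [pvPer]

theorem pvPer_short (l : List Int) (p : Nat) (h : l.length ≤ p) : pvPer l p := by
  unfold pvPer
  rw [List.drop_eq_nil_of_le h, show l.length - p = 0 from by omega]
  simp

theorem pvPer_extend (pre : List Int) (p : Nat) (hp : 0 < p) (hle : p ≤ pre.length)
    (h : pvPer pre p) (x : Int) (hx : x = pre[pre.length % p]'(by have := Nat.mod_lt pre.length hp; omega)) :
    pvPer (pre ++ [x]) p := by
  have h3 : pre[pre.length - p]'(by omega) = x := by
    rw [hx]
    have h5 := pvPer_mod pre p hp h (pre.length - p) (by omega)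
    rw [h5]
    exact getElem_congr_idx ((Nat.mod_eq_sub_mod hle).symm)
  unfold pvPer at h ⊢
  rw [List.drop_append_of_le_length hle, h]
  have hlen : (pre ++ [x]).length - p = (pre.length - p) + 1 := by simp; omega
  rw [hlen, List.take_append_of_le_length (by omega), List.take_add_one]
  rw [List.getElem?_eq_getElem (by omega : pre.length - p < pre.length)]
  simp [h3]

theorem pvEnumDict_get? (xs : List Int) (s k : Int) :
    (PySem.Dict.mk (PySem.List.enumerate xs s)).get? k =
      if h : 0 ≤ k - s ∧ k - s < xs.length then some (xs[(k - s).toNat]'(by omega)) else none := by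
  induction xs generalizing s with
  | nil =>
    have h0 : (PySem.Dict.mk (PySem.List.enumerate ([] : List Int) s)).get? k = none := rfl
    rw [h0, dif_neg (by rintro ⟨h1, h2⟩; simp at h2; omega)]
  | cons y ys ih =>
    have hk' : s = k ∨ s ≠ k := em _
    rw [PySem.List.enumerate_cons, PySem.Dict.get?_mk_cons]
    rcases hk' with hk | hk
    · subst hk; simp
    · rw [if_neg (by simpa using hk), ih (s + 1)]
      by_cases hc : 0 ≤ k - (s + 1) ∧ k - (s + 1) < ys.length
      · rw [dif_pos hc, dif_pos (by constructor <;> [omega; (simp; omega)])]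
        have hidx : (k - s).toNat = (k - (s + 1)).toNat + 1 := by omega
        rw [getElem_congr_idx hidx, List.getElem_cons_succ]
      · rw [dif_neg hc, dif_neg (by rintro ⟨h1, h2⟩; simp at h2; exact hc ⟨by omega, by omega⟩)]

theorem pvInsert_same (d : PySem.Dict Int Int) (k v : Int)
    (hn : d.keys.Nodup) (h : d.get? k = some v) : d.insert k v = d := by
  apply PySem.Dict.ext
  have hc : d.contains k = true := by
    rw [PySem.Dict.contains_eq_isSome_get?, h]; rfl
  rw [PySem.Dict.items_insert_of_contains d v hc]
  have hid : ∀ p ∈ d.items, (if (p.1 == k) = true then (k, v) else p) = p := by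
    intro p hp
    by_cases hpk : p.1 = k
    · have h2 : d.get? k = some p.2 := by
        rw [← hpk]; exact PySem.Dict.get?_of_mem_items d hp hn
      have hv : v = p.2 := Option.some.inj (h.symm.trans h2)
      have hpe : p = (k, v) := by
        obtain ⟨p1, p2⟩ := p
        simp only at hpk hv
        simp [hpk, ← hv]
      simp [hpe]
    · simp [hpk]
  calc List.map (fun p => if (p.1 == k) = true then (k, v) else p) d.items
      = List.map id d.items := List.map_congr_left (by simpa using hid)
    _ = d.items := List.map_id _

theorem pvEnumerate_append_singleton (xs : List Int) (x : Int) (s : Int) :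
    PySem.List.enumerate (xs ++ [x]) s = PySem.List.enumerate xs s ++ [(s + xs.length, x)] := by
  induction xs generalizing s with
  | nil => simp [PySem.List.enumerate_cons, PySem.List.enumerate_nil]
  | cons y ys ih =>
    have harith : (s + 1) + (ys.length : Int) = s + ((y :: ys).length : Int) := by
      push_cast [List.length_cons]; omega
    rw [List.cons_append, PySem.List.enumerate_cons, ih (s + 1), harith,
        PySem.List.enumerate_cons, List.cons_append]

theorem pvSeenLoopA_inv (d : List Int) (p : Nat) (hp : 0 < p) :
    ∀ (rest pre : List Int), pre ++ rest = d → pvPer pre p →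
      pvSeenLoopA (p : Int) rest (pre.length : Int)
          (PySem.Dict.mk (PySem.List.enumerate (pre.take p) 0)) =
        if d.drop p = d.take (d.length - p)
        then some (PySem.Dict.mk (PySem.List.enumerate (d.take p) 0)) else none := by
  intro rest
  induction rest with
  | nil =>
    intro pre hpre hper
    have hpd : pre = d := by simpa using hpre
    subst hpd
    rw [if_pos (show List.drop p pre = List.take (pre.length - p) pre from hper)]
    rfl
  | cons x rest' ih =>
    intro pre hpre hper
    rw [pvSeenLoopA]
    have hmod : PySem.Int.mod (pre.length : Int) (p : Int) = ((pre.length % p : Nat) : Int) :=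
      PySem.Int.mod_natCast _ _
    have hnodup : (PySem.Dict.mk (PySem.List.enumerate (pre.take p) 0)).keys.Nodup := by
      rw [PySem.Dict.keys_mk, PySem.List.map_fst_enumerate]
      exact PySem.List.nodup_pyRange_one _ _
    by_cases hLp : pre.length < p
    · -- index below period: fresh key, no possible break
      have hget : (PySem.Dict.mk (PySem.List.enumerate (pre.take p) 0)).get?
          (PySem.Int.mod (pre.length : Int) (p : Int)) = none := by
        rw [hmod, pvEnumDict_get?, dif_neg]
        rintro ⟨h1, h2⟩
        rw [List.length_take, Nat.mod_eq_of_lt hLp] at h2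
        omega
      have hcont : (PySem.Dict.mk (PySem.List.enumerate (pre.take p) 0)).contains
          (PySem.Int.mod (pre.length : Int) (p : Int)) = false := by
        rw [PySem.Dict.contains_eq_isSome_get?, hget]; rfl
      rw [if_neg (by rw [hcont]; simp)]
      have hins : (PySem.Dict.mk (PySem.List.enumerate (pre.take p) 0)).insert
          (PySem.Int.mod (pre.length : Int) (p : Int)) x =
          PySem.Dict.mk (PySem.List.enumerate ((pre ++ [x]).take p) 0) := by
        apply PySem.Dict.ext
        rw [PySem.Dict.items_insert_of_not_contains _ _ hcont]
        have t1 : pre.take p = pre := List.take_of_length_le (by omega)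
        have t2 : (pre ++ [x]).take p = pre ++ [x] := List.take_of_length_le (by simp; omega)
        rw [t1, t2, pvEnumerate_append_singleton]
        simp [hmod, Nat.mod_eq_of_lt hLp]
      rw [hins]
      have := ih (pre ++ [x]) (by simpa using hpre)
        (pvPer_short _ p (by simp; omega))
      simpa [Int.add_comm] using this
    · push_neg at hLp
      have hmlt : pre.length % p < p := Nat.mod_lt _ hp
      have hmL : pre.length % p < pre.length := lt_of_lt_of_le hmlt hLp
      have hget : (PySem.Dict.mk (PySem.List.enumerate (pre.take p) 0)).get?
          (PySem.Int.mod (pre.length : Int) (p : Int)) =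
          some (pre[pre.length % p]'hmL) := by
        rw [hmod, pvEnumDict_get?,
            dif_pos ⟨by omega, by rw [List.length_take]; push_cast; omega⟩]
        congr 1
        rw [List.getElem_take]
        exact getElem_congr_idx (by omega)
      have hcont : (PySem.Dict.mk (PySem.List.enumerate (pre.take p) 0)).contains
          (PySem.Int.mod (pre.length : Int) (p : Int)) = true := by
        rw [PySem.Dict.contains_eq_isSome_get?, hget]; rfl
      by_cases hx : pre[pre.length % p]'hmL = x
      · -- value agrees: overwrite with the same value, continue
        rw [if_neg (by rw [hget, hx]; simp)]
        have hins : (PySem.Dict.mk (PySem.List.enumerate (pre.take p) 0)).insert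
            (PySem.Int.mod (pre.length : Int) (p : Int)) x =
            PySem.Dict.mk (PySem.List.enumerate ((pre ++ [x]).take p) 0) := by
          rw [pvInsert_same _ _ _ hnodup (by rw [hget, hx]),
              List.take_append_of_le_length hLp]
        rw [hins]
        have := ih (pre ++ [x]) (by simpa using hpre)
          (pvPer_extend pre p hp hLp hper x hx.symm)
        simpa [Int.add_comm] using this
      · -- mismatch: break; the whole list cannot be p-periodic
        rw [if_pos ⟨hcont, by rw [hget]; simpa using hx⟩]
        rw [if_neg]
        intro hd
        subst hpre
        have hiL : pre.length < (pre ++ x :: rest').length := by simp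
        have e1 := pvPer_mod (pre ++ x :: rest') p hp hd pre.length hiL
        have e1' : (pre ++ x :: rest')[pre.length]? =
            (pre ++ x :: rest')[pre.length % p]? := by
          rw [List.getElem?_eq_getElem hiL, List.getElem?_eq_getElem (by simp; omega)]
          exact congrArg some e1
        have e2' : (pre ++ x :: rest')[pre.length]? = some x := by
          rw [List.getElem?_append_right (le_refl pre.length)]
          simp
        have e3' : (pre ++ x :: rest')[pre.length % p]? = some (pre[pre.length % p]'hmL) := by
          rw [List.getElem?_append_left hmL]
          exact List.getElem?_eq_getElem hmL
        have : some x = some (pre[pre.length % p]'hmL) := by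
          rw [← e2', e1', e3']
        exact hx (Option.some.inj this).symm

theorem pvSeenLoopA_spec (data : List Int) (p : Int) (hp : 1 ≤ p) :
    pvSeenLoopA p data 0 PySem.Dict.empty =
      if PySem.List.slice data (some p) none = PySem.List.slice data none (some (-p))
      then some (PySem.Dict.mk (PySem.List.enumerate (PySem.List.slice data none (some p)) 0))
      else none := by
  obtain ⟨P, rfl⟩ : ∃ P : Nat, p = (P : Int) := ⟨p.toNat, (Int.toNat_of_nonneg (by omega)).symm⟩
  have hP : 0 < P := by exact_mod_cast hp
  rw [PySem.List.slice_from_natCast, PySem.List.slice_to_neg_natCast data P hP,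
      PySem.List.slice_to_natCast]
  have h := pvSeenLoopA_inv data P hP data [] (by simp) (pvPer_nil P)
  simpa using h

theorem pvFoldl_if_skip {α β : Type} (c : β → Bool) (f : α → β → α) :
    ∀ (l : List β) (a : α),
      l.foldl (fun acc x => if c x then f acc x else acc) a = (l.filter c).foldl f a := by
  intro l
  induction l with
  | nil => intro a; rfl
  | cons x xs ih =>
    intro a
    by_cases h : c x = true <;> simp [h, ih]

-- ===== VERDICT (by name: the statement is the Claim_ definition above) =====
theorem find_periodic_accesses_spec : Claim_equal_find_periodic_accesses := by
  intro data mp _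
  unfold Spec_find_periodic_accesses find_periodic_accesses find_periodic_accesses_alt
  rw [PySem.List.foldl_congr_mem _ _
    (fun pp p =>
      if (PySem.List.slice data (some p) none == PySem.List.slice data none (some (-p))) = true
      then pp.insert p (PySem.List.enumerate (PySem.List.slice data none (some p)) 0)
      else pp) _ ?hcong]
  case hcong =>
    intro acc p hpmem
    have hp1 : 1 ≤ p := (PySem.List.mem_pyRange_one.mp hpmem).1
    rw [pvSeenLoopA_spec data p hp1]
    by_cases hcond : PySem.List.slice data (some p) none = PySem.List.slice data none (some (-p))
    · simp [hcond]
    · simp [hcond]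
  rw [pvFoldl_if_skip]
  rw [PySem.Dict.items_foldl_insert_fresh
        ((PySem.List.pyRange 1 mp 1).filter
          (fun p => PySem.List.slice data (some p) none == PySem.List.slice data none (some (-p))))
        (fun a => a)
        (fun a => PySem.List.enumerate (PySem.List.slice data none (some a)) 0)
        PySem.Dict.empty
        (by intro a _; simp)
        (by simpa using (PySem.List.nodup_pyRange_one 1 mp).filter _)]
  simp [PySem.Dict.empty]
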